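-- pv_equiv track=rewrite | github.com/ikr/algo-practice | bin_tree_next.py | next_path
-- ===== SOURCE A (Python) =====
-- def next_path(p):
--     result = list(p)
--     for i in range(len(result)):
--         if result[i]:
--             result[i] = False
--             break
--         result[i] = True
--     return result
-- ===== SOURCE B (Python) =====
-- def next_path(p):
--     n = 0
--     for i in range(len(p)):
--         if not p[i]:
--             n += 1 << i
--     n += 1
--     return [(n >> i) & 1 == 0 for i in range(len(p))]
-- ===== Notes on version B (the rewrite author's own statement) =====
-- stated objective: alternative
-- what changed: A scans the list flipping cells in place until it clears the first True; B encodes the whole list as a little-endian integer (True bit = 0, False bit = 1), adds 1, and decodes the bits back into a list.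
import Mathlib
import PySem

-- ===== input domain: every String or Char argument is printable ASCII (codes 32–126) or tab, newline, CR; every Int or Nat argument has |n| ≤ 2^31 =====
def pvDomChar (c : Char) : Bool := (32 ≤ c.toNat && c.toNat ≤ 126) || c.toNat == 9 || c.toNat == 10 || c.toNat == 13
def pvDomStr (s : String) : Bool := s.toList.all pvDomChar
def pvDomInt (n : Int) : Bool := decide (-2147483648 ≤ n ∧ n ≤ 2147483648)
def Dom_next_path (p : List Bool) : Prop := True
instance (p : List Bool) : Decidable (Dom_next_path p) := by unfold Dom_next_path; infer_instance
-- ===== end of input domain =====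

-- B replaces A's flip-and-break scan by arithmetic: encode (True bit = 0, False bit = 1, little-endian), add 1, decode; same asymptotic cost, different algorithm.

-- ===== PORT A =====
-- A's loop over the copied list: set each False cell to True until the first True, which becomes False (break).
def next_path (p : List Bool) : List Bool :=
  match p with
  | [] => []
  | true :: t => false :: t
  | false :: t => true :: next_path t

-- ===== PORT B =====
-- B: n = sum of 2^i over indices with falsy p[i]; n += 1; output bit i of n, inverted, per index.
def next_path_alt (p : List Bool) : List Bool :=
  let n := (List.range p.length).foldl
      (fun acc i => if !(p.getD i false) then acc + 2 ^ i else acc) 0 + 1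
  (List.range p.length).map (fun i => decide ((n >>> i) &&& 1 = 0))

-- ===== PRECONDITION & SPEC =====
def Spec_next_path (p : List Bool) (out : List Bool) : Prop := out = next_path_alt p
instance (p : List Bool) (out : List Bool) : Decidable (Spec_next_path p out) := by unfold Spec_next_path; infer_instance

-- ===== CLAIM (what is proved, stated in full; the proofs are below) =====
def Claim_equal_next_path : Prop := ∀ (p : List Bool), Dom_next_path p → Spec_next_path p (next_path p)

-- ===== LEMMAS AND PROOFS =====

-- the little-endian value of a path (True bit = 0, False bit = 1)
def pvVal : List Bool → Nat
  | [] => 0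
  | b :: t => (if b then 0 else 1) + 2 * pvVal t

-- the bit-decoding half of next_path_alt, as a named function of the length and the number
def pvDecode (len m : Nat) : List Bool :=
  (List.range len).map (fun i => decide ((m >>> i) &&& 1 = 0))

theorem pvDecode_succ (len m : Nat) :
    pvDecode (len + 1) m = decide (m % 2 = 0) :: pvDecode len (m / 2) := by
  unfold pvDecode
  rw [List.range_succ_eq_map]
  simp only [List.map_cons, List.map_map]
  congr 1
  · simp [Nat.shiftRight_zero, Nat.and_one_is_mod]
  · apply List.map_congr_left
    intro i _
    simp only [Function.comp_apply]
    congr 1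
    simp [Nat.shiftRight_eq_div_pow, Nat.and_one_is_mod, pow_succ,
      Nat.div_div_eq_div_mul, Nat.mul_comm]

-- the encoding half of next_path_alt computes pvVal (generalized over a scale factor and accumulator)
theorem pvFold_val (p : List Bool) : ∀ (c acc : Nat),
    (List.range p.length).foldl
      (fun a i => if !(p.getD i false) then a + c * 2 ^ i else a) acc
      = acc + c * pvVal p := by
  induction p with
  | nil => intro c acc; simp [pvVal]
  | cons b t ih =>
    intro c acc
    rw [List.length_cons, List.range_succ_eq_map, List.foldl_cons, List.foldl_map]
    have h2 : ∀ a i, (if !((b :: t).getD (i + 1) false) then a + c * 2 ^ (i + 1) else a)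
        = (if !(t.getD i false) then a + (2 * c) * 2 ^ i else a) := by
      intro a i
      simp [List.getD, pow_succ]
      ring_nf
    simp only [h2]
    rw [ih (2 * c)]
    cases b <;> simp [pvVal, List.getD] <;> ring

-- decoding the value of a path gives the path back
theorem pvDecode_val (p : List Bool) : pvDecode p.length (pvVal p) = p := by
  induction p with
  | nil => rfl
  | cons b t ih =>
    rw [List.length_cons, pvDecode_succ]
    cases b
    · have hm : (1 + 2 * pvVal t) % 2 = 1 := by omega
      have hd : (1 + 2 * pvVal t) / 2 = pvVal t := by omega
      simp [pvVal, hm, hd, ih]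
    · have hd : (2 * pvVal t) / 2 = pvVal t := by omega
      simp [pvVal, hd, ih]

-- A computes the decoded successor of the value
theorem next_path_eq_decode (p : List Bool) :
    next_path p = pvDecode p.length (pvVal p + 1) := by
  induction p with
  | nil => rfl
  | cons b t ih =>
    rw [List.length_cons, pvDecode_succ]
    cases b
    · show true :: next_path t = _
      rw [ih]
      have hm : (1 + 2 * pvVal t + 1) % 2 = 0 := by omega
      have hd : (1 + 2 * pvVal t + 1) / 2 = pvVal t + 1 := by omega
      simp [pvVal, hm, hd]
    · show false :: t = _
      have hm : (2 * pvVal t + 1) % 2 = 1 := by omega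
      have hd : (2 * pvVal t + 1) / 2 = pvVal t := by omega
      simp [pvVal, hm, hd, pvDecode_val]

theorem next_path_alt_eq_decode (p : List Bool) :
    next_path_alt p = pvDecode p.length (pvVal p + 1) := by
  unfold next_path_alt pvDecode
  rw [show (fun (a : Nat) (i : Nat) => if !(p.getD i false) then a + 2 ^ i else a)
      = (fun a i => if !(p.getD i false) then a + 1 * 2 ^ i else a) by funext a i; simp]
  rw [pvFold_val p 1 0]
  simp

-- ===== VERDICT (by name: the statement is the Claim_ definition above) =====
theorem next_path_spec : Claim_equal_next_path := by
  intro p _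
  show next_path p = next_path_alt p
  rw [next_path_eq_decode, next_path_alt_eq_decode]
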